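-- pv_equiv track=rewrite | github.com/aliakarma/langchain-prompt-injection | src/prompt_injection/evaluation/benchmark.py | _length_stratified_texts
-- ===== SOURCE A (Python) =====
-- def _length_stratified_texts(texts: list[str]) -> list[str]:
--     if not texts:
--         return texts
--     buckets: dict[str, list[str]] = {"short": [], "medium": [], "long": []}
--     for text in texts:
--         length = len(text)
--         if length < 80:
--             buckets["short"].append(text)
--         elif length < 160:
--             buckets["medium"].append(text)
--         else:
--             buckets["long"].append(text)
--     ordered: list[str] = []
--     for bucket in ("short", "medium", "long"):
--         ordered.extend(sorted(buckets[bucket], key=len))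
--     return ordered
-- ===== SOURCE B (Python) =====
-- def _length_stratified_texts(texts: list[str]) -> list[str]:
--     return sorted(texts, key=len)
-- ===== Notes on version B (the rewrite author's own statement) =====
-- stated objective: simpler
-- what changed: The three length buckets plus per-bucket stable sort are replaced by a single global stable sort by length: since the bucket boundaries are monotone in the key, one sorted(texts, key=len) yields the identical list, removing the dict, the classification loop and the concatenation loop.
import Mathlib
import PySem

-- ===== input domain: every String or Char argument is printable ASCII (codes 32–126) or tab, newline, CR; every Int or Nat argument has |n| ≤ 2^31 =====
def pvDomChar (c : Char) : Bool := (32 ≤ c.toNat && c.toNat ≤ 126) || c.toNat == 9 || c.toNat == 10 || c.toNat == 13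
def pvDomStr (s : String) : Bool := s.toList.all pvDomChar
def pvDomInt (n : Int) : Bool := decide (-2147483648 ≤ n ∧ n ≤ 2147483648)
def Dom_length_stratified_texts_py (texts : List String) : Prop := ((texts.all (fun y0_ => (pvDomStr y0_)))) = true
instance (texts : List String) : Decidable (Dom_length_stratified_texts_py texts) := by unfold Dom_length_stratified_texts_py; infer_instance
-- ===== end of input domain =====

-- B replaces the bucket dict + per-bucket sorts with one global stable sort by length (simpler; same result).


-- ===== PORT A =====
def length_stratified_texts_py (texts : List String) : List String :=
  if texts = [] then texts
  else
    let buckets : PySem.Dict String (List String) :=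
      ((PySem.Dict.empty.insert "short" []).insert "medium" []).insert "long" []
    let buckets := texts.foldl
      (fun b text =>
        let length := PySem.Str.len text
        if length < 80 then b.modify "short" [] (fun l => l ++ [text])
        else if length < 160 then b.modify "medium" [] (fun l => l ++ [text])
        else b.modify "long" [] (fun l => l ++ [text])) buckets
    ["short", "medium", "long"].foldl
      (fun ordered bucket => ordered ++ PySem.List.sorted (buckets.getD bucket []) (fun t => PySem.Str.len t)) []

-- ===== PORT B =====
def length_stratified_texts_py_alt (texts : List String) : List String :=
  PySem.List.sorted texts (fun t => PySem.Str.len t)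

-- ===== PRECONDITION & SPEC =====
def Spec_length_stratified_texts_py (texts : List String) (out : List String) : Prop := out = length_stratified_texts_py_alt texts
instance (texts : List String) (out : List String) : Decidable (Spec_length_stratified_texts_py texts out) := by unfold Spec_length_stratified_texts_py; infer_instance

-- ===== CLAIM (what is proved, stated in full; the proofs are below) =====
def Claim_equal_length_stratified_texts_py : Prop := ∀ (texts : List String), Dom_length_stratified_texts_py texts → Spec_length_stratified_texts_py texts (length_stratified_texts_py texts)

-- ===== LEMMAS AND PROOFS =====

-- the bucket key A's loop files each text under
def pvBucketOf (t : String) : String :=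
  if PySem.Str.len t < 80 then "short" else if PySem.Str.len t < 160 then "medium" else "long"

theorem pv_insertBy_cons {α : Type} (before : α → α → Bool) (x y : α) (ys : List α) :
    PySem.List.insertBy before x (y :: ys)
      = if before x y then x :: y :: ys else y :: PySem.List.insertBy before x ys := rfl

-- inserting an element smaller (under the key) than everything in L2 stays left of L2
theorem pv_insertBy_append_left {α : Type} (before : α → α → Bool) (x : α) (L1 L2 : List α)
    (h : ∀ y ∈ L2, before x y = true) :
    PySem.List.insertBy before x (L1 ++ L2) = PySem.List.insertBy before x L1 ++ L2 := by
  induction L1 with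
  | nil =>
    cases L2 with
    | nil => rfl
    | cons y ys =>
      simp [PySem.List.insertBy, pv_insertBy_cons, h y (by simp)]
  | cons z L1' ih =>
    simp only [List.cons_append, pv_insertBy_cons]
    by_cases hz : before x z = true
    · simp [hz]
    · simp [hz, ih]

-- inserting an element not smaller than anything in L1 passes over L1
theorem pv_insertBy_append_right {α : Type} (before : α → α → Bool) (x : α) (L1 L2 : List α)
    (h : ∀ y ∈ L1, before x y = false) :
    PySem.List.insertBy before x (L1 ++ L2) = L1 ++ PySem.List.insertBy before x L2 := by
  induction L1 with
  | nil => rfl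
  | cons z L1' ih =>
    have hz : before x z = false := h z (by simp)
    simp only [List.cons_append, pv_insertBy_cons, hz]
    simp [ih (fun y hy => h y (by simp [hy]))]

-- the insertion-sort fold splits at any key threshold c
theorem pv_foldl_insertBy_split {α : Type} (key : α → Int) (c : Int) :
    ∀ (xs L1 L2 : List α), (∀ a ∈ L1, key a < c) → (∀ a ∈ L2, c ≤ key a) →
    xs.foldl (fun acc x => PySem.List.insertBy (fun a b => decide (key a < key b)) x acc) (L1 ++ L2)
      = (xs.filter (fun x => decide (key x < c))).foldl
          (fun acc x => PySem.List.insertBy (fun a b => decide (key a < key b)) x acc) L1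
        ++ (xs.filter (fun x => !decide (key x < c))).foldl
          (fun acc x => PySem.List.insertBy (fun a b => decide (key a < key b)) x acc) L2 := by
  intro xs
  induction xs with
  | nil => intro L1 L2 _ _; rfl
  | cons x xs ih =>
    intro L1 L2 h1 h2
    by_cases hx : key x < c
    · have hins : PySem.List.insertBy (fun a b => decide (key a < key b)) x (L1 ++ L2)
          = PySem.List.insertBy (fun a b => decide (key a < key b)) x L1 ++ L2 :=
        pv_insertBy_append_left _ x L1 L2 (fun y hy => by
          simp only [decide_eq_true_eq]; exact lt_of_lt_of_le hx (h2 y hy))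
      simp only [List.foldl_cons, List.filter_cons, hx, decide_true, Bool.not_true, hins]
      exact ih _ _ (fun a ha => by
        rcases (PySem.List.mem_insertBy _ x a L1).mp ha with h | h
        · exact h ▸ hx
        · exact h1 a h) h2
    · have hins : PySem.List.insertBy (fun a b => decide (key a < key b)) x (L1 ++ L2)
          = L1 ++ PySem.List.insertBy (fun a b => decide (key a < key b)) x L2 :=
        pv_insertBy_append_right _ x L1 L2 (fun y hy => by
          simp only [decide_eq_false_iff_not, not_lt]
          exact le_trans (le_of_lt (h1 y hy)) (not_lt.mp hx))
      simp only [List.foldl_cons, List.filter_cons, hx, decide_false, Bool.not_false, hins]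
      exact ih _ _ h1 (fun a ha => by
        rcases (PySem.List.mem_insertBy _ x a L2).mp ha with h | h
        · exact h ▸ not_lt.mp hx
        · exact h2 a h)

-- a stable sort by an Int key splits at any threshold c
theorem pv_sorted_split {α : Type} (key : α → Int) (c : Int) (xs : List α) :
    PySem.List.sorted xs key
      = PySem.List.sorted (xs.filter (fun x => decide (key x < c))) key
        ++ PySem.List.sorted (xs.filter (fun x => !decide (key x < c))) key := by
  rw [PySem.List.sorted_eq_foldl_insertBy xs key,
      PySem.List.sorted_eq_foldl_insertBy (xs.filter (fun x => decide (key x < c))) key,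
      PySem.List.sorted_eq_foldl_insertBy (xs.filter (fun x => !decide (key x < c))) key]
  exact pv_foldl_insertBy_split key c xs [] [] (by simp) (by simp)

-- the dict loop of A: the bucket at key c collects exactly the texts filed under c, in order
theorem pv_bucket_getD (texts : List String) (d : PySem.Dict String (List String)) (c : String) :
    (texts.foldl
      (fun b text =>
        let length := PySem.Str.len text
        if length < 80 then b.modify "short" [] (fun l => l ++ [text])
        else if length < 160 then b.modify "medium" [] (fun l => l ++ [text])
        else b.modify "long" [] (fun l => l ++ [text])) d).getD c []
    = d.getD c [] ++ texts.filter (fun t => pvBucketOf t == c) := by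
  induction texts generalizing d with
  | nil => simp
  | cons t ts ih =>
    simp only [List.foldl_cons, List.filter_cons, ih, pvBucketOf]
    by_cases h80 : PySem.Str.len t < 80
    · simp only [h80, if_true]
      rw [PySem.Dict.getD_modify]
      by_cases hc : c = "short"
      · subst hc; simp
      · simp [hc, beq_iff_eq, Ne.symm hc]
    · by_cases h160 : PySem.Str.len t < 160
      · simp only [h80, h160, if_false, if_true]
        rw [PySem.Dict.getD_modify]
        by_cases hc : c = "medium"
        · subst hc; simp
        · simp [hc, beq_iff_eq, Ne.symm hc]
      · simp only [h80, h160, if_false]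
        rw [PySem.Dict.getD_modify]
        by_cases hc : c = "long"
        · subst hc; simp
        · simp [hc, beq_iff_eq, Ne.symm hc]

-- ===== VERDICT (by name: the statement is the Claim_ definition above) =====
theorem length_stratified_texts_py_spec : Claim_equal_length_stratified_texts_py := by
  intro texts _
  unfold Spec_length_stratified_texts_py length_stratified_texts_py length_stratified_texts_py_alt
  by_cases hnil : texts = []
  · subst hnil; rfl
  · simp only [hnil, if_false]
    have hgetD := fun c => pv_bucket_getD texts
      (((PySem.Dict.empty.insert "short" []).insert "medium" []).insert "long" []) c
    have hshort : (((PySem.Dict.empty.insert "short" []).insert "medium" []).insert "long"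
        []).getD "short" ([] : List String) = [] := by decide
    have hmed : (((PySem.Dict.empty.insert "short" []).insert "medium" []).insert "long"
        []).getD "medium" ([] : List String) = [] := by decide
    have hlong : (((PySem.Dict.empty.insert "short" []).insert "medium" []).insert "long"
        []).getD "long" ([] : List String) = [] := by decide
    simp only [List.foldl_cons, List.foldl_nil, List.nil_append]
    rw [hgetD "short", hgetD "medium", hgetD "long", hshort, hmed, hlong]
    simp only [List.nil_append]
    -- identify the three bucket filters with threshold filters
    have hfs : texts.filter (fun t => pvBucketOf t == "short")
        = texts.filter (fun t => decide (PySem.Str.len t < 80)) := by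
      apply List.filter_congr
      intro t _
      simp only [pvBucketOf]
      split_ifs with h1 h2 <;> simp_all
    have hfm : texts.filter (fun t => pvBucketOf t == "medium")
        = (texts.filter (fun t => !decide (PySem.Str.len t < 80))).filter
            (fun t => decide (PySem.Str.len t < 160)) := by
      rw [List.filter_filter]
      apply List.filter_congr
      intro t _
      simp only [pvBucketOf]
      split_ifs with h1 h2 <;> simp_all
    have hfl : texts.filter (fun t => pvBucketOf t == "long")
        = (texts.filter (fun t => !decide (PySem.Str.len t < 80))).filter
            (fun t => !decide (PySem.Str.len t < 160)) := by
      rw [List.filter_filter]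
      apply List.filter_congr
      intro t _
      simp only [pvBucketOf]
      split_ifs with h1 h2 <;> simp_all
    rw [hfs, hfm, hfl,
        pv_sorted_split (fun t => PySem.Str.len t) 80 texts,
        pv_sorted_split (fun t => PySem.Str.len t) 160
          (texts.filter (fun t => !decide (PySem.Str.len t < 80)))]
    simp [List.append_assoc]
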